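-- pv_equiv track=rewrite | github.com/florenciarouco/tallerDeGit | guia7.py | vocalesdistintas
-- ===== SOURCE A (Python) =====
-- def vocalesdistintas (frase:str) -> bool:
--     cont = 0
--     vocales = ['a','e','i','o','u']
--     for i in frase:
--         if (i in vocales):
--             cont += 1
--             vocales.remove(i)
--     return (cont>=3)
-- ===== SOURCE B (Python) =====
-- def vocalesdistintas(frase: str) -> bool:
--     return len(set(frase) & set('aeiou')) >= 3
-- ===== Notes on version B (the rewrite author's own statement) =====
-- stated objective: simpler
-- what changed: Replaces the counter loop that mutates a shrinking vowel list with a single set intersection: distinct characters of the phrase intersected with the vowel set, testing its size.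
import Mathlib
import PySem

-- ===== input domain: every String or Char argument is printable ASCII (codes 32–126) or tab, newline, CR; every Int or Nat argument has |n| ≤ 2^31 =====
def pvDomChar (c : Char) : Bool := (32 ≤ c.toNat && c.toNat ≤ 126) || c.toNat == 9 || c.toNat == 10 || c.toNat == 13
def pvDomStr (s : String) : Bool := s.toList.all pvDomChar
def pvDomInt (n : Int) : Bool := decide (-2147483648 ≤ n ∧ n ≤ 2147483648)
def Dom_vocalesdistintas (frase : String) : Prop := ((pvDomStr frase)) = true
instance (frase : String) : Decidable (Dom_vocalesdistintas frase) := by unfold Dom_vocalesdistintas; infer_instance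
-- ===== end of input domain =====

-- B replaces A's counter loop over a mutating vowel list with one set intersection (simpler).

-- ===== PORT A =====
-- step of A's for-loop: membership test, count, remove the vowel from the list
def vocalesdistintasStep (st : Int × List Char) (i : Char) : Int × List Char :=
  if st.2.contains i then (st.1 + 1, (PySem.List.remove? st.2 i).getD st.2) else st

def vocalesdistintas (frase : String) : Bool :=
  decide ((frase.toList.foldl vocalesdistintasStep (0, ['a', 'e', 'i', 'o', 'u'])).1 ≥ 3)

-- ===== PORT B =====
def vocalesdistintas_alt (frase : String) : Bool :=
  decide (PySem.Set.len (PySem.Set.inter (PySem.Set.ofList frase.toList)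
            (PySem.Set.ofList "aeiou".toList)) ≥ 3)

-- ===== PRECONDITION & SPEC =====
def Spec_vocalesdistintas (frase : String) (out : Bool) : Prop := out = vocalesdistintas_alt frase
instance (frase : String) (out : Bool) : Decidable (Spec_vocalesdistintas frase out) := by unfold Spec_vocalesdistintas; infer_instance

-- ===== CLAIM (what is proved, stated in full; the proofs are below) =====
def Claim_equal_vocalesdistintas : Prop := ∀ (frase : String), Dom_vocalesdistintas frase → Spec_vocalesdistintas frase (vocalesdistintas frase)

-- ===== LEMMAS AND PROOFS =====

-- counting lemma for the cons step of A's fold, i a member of the (nodup) list voc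
theorem pv_filter_erase (i : Char) (rest : List Char) : ∀ (voc : List Char), voc.Nodup → i ∈ voc →
    (voc.filter (fun x => x ∈ i :: rest)).length
      = ((voc.erase i).filter (fun x => x ∈ rest)).length + 1 := by
  intro voc
  induction voc with
  | nil => intro _ hi; cases hi
  | cons v tl ih =>
    intro hnd hi
    rcases List.nodup_cons.1 hnd with ⟨hv, hndtl⟩
    by_cases hvi : v = i
    · subst hvi
      have herase : (v :: tl).erase v = tl := by simp
      have hcong : tl.filter (fun x => decide (x ∈ v :: rest)) = tl.filter (fun x => decide (x ∈ rest)) := by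
        apply List.filter_congr
        intro x hx
        have hxv : x ≠ v := fun h => hv (h ▸ hx)
        simp [hxv]
      rw [herase, List.filter_cons]
      simp only [show decide (v ∈ v :: rest) = true by simp, hcong]
      simp [Nat.add_comm]
    · have hitl : i ∈ tl := by
        rcases List.mem_cons.1 hi with h | h
        · exact absurd h.symm hvi
        · exact h
      have herase : (v :: tl).erase i = v :: tl.erase i := by
        rw [List.erase_cons_tail]
        simp [hvi]
      have hmem : decide (v ∈ i :: rest) = decide (v ∈ rest) := by simp [hvi]
      rw [herase, List.filter_cons, List.filter_cons, hmem]
      by_cases hvr : v ∈ rest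
      · rw [if_pos (by simpa using hvr), if_pos (by simpa using hvr)]
        simp only [List.length_cons]
        rw [ih hndtl hitl]
      · rw [if_neg (by simpa using hvr), if_neg (by simpa using hvr)]
        exact ih hndtl hitl
-- A's fold counts, on top of cont, the members of voc occurring in l
theorem pv_foldA (l : List Char) : ∀ (cont : Int) (voc : List Char), voc.Nodup →
    (l.foldl vocalesdistintasStep (cont, voc)).1
      = cont + ((voc.filter (fun x => x ∈ l)).length : Int) := by
  induction l with
  | nil => intro cont voc _; simp
  | cons i rest ih =>
    intro cont voc hnd
    by_cases hi : i ∈ voc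
    · have hstep : vocalesdistintasStep (cont, voc) i = (cont + 1, voc.erase i) := by
        rw [vocalesdistintasStep]
        simp only [hi, List.contains_iff_mem, if_true]
        rw [PySem.List.remove?_eq_some_erase voc i hi]
        rfl
      rw [List.foldl_cons, hstep, ih (cont + 1) (voc.erase i) (hnd.erase i),
          pv_filter_erase i rest voc hnd hi]
      push_cast
      ring
    · have hstep : vocalesdistintasStep (cont, voc) i = (cont, voc) := by
        simp [vocalesdistintasStep, hi]
      have hcong : voc.filter (fun x => decide (x ∈ i :: rest)) = voc.filter (fun x => decide (x ∈ rest)) := by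
        apply List.filter_congr
        intro x hx
        have hxi : x ≠ i := fun h => hi (h ▸ hx)
        simp [hxi]
      rw [List.foldl_cons, hstep, ih cont voc hnd]
      simp only [List.mem_cons] at hcong ⊢
      rw [hcong]

-- the two counts agree: distinct vowels of l, counted from either side
theorem pv_counts (l : List Char) :
    ((PySem.Set.inter (PySem.Set.ofList l) (PySem.Set.ofList "aeiou".toList)).length)
      = ((['a', 'e', 'i', 'o', 'u'].filter (fun x => x ∈ l)).length) := by
  apply List.Perm.length_eq
  apply (List.perm_ext_iff_of_nodup _ _).2
  · intro a
    simp only [PySem.Set.mem_inter, PySem.Set.mem_ofList, List.mem_filter]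
    constructor
    · rintro ⟨h1, h2⟩
      refine ⟨?_, by simpa using h1⟩
      simpa using h2
    · rintro ⟨h1, h2⟩
      refine ⟨by simpa using h2, ?_⟩
      simpa using h1
  · exact PySem.Set.nodup_inter _ _ (PySem.Set.nodup_ofList l)
  · exact List.Nodup.filter _ (by decide)

-- ===== VERDICT (by name: the statement is the Claim_ definition above) =====
theorem vocalesdistintas_spec : Claim_equal_vocalesdistintas := by
  intro frase _
  unfold Spec_vocalesdistintas vocalesdistintas vocalesdistintas_alt
  rw [pv_foldA frase.toList 0 ['a', 'e', 'i', 'o', 'u'] (by decide)]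
  simp only [PySem.Set.len, pv_counts frase.toList]
  norm_num
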